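-- pv_equiv track=rewrite | github.com/michaelkimm/Algorithm-problem-solving-thought-process-re-record | Python/Baek2110.py | bisect_best_installable_dist
-- ===== SOURCE A (Python) =====
-- def check_installable(ary, deviceCnt, minInterval):
--   deviceRemain = deviceCnt
--   prevInstalledPose = 0
--   for housePose in ary:
--     # 처음 or 현재 위치 - 이전 설치한 것 >= minInterval
--     if housePose == ary[0] or housePose - prevInstalledPose >= minInterval:
--       deviceRemain -= 1
--       prevInstalledPose = housePose
--
--   return False if deviceRemain > 0 else True
--
-- def bisect_best_installable_dist(ary, deviceCnt):
--   start = 0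
--   end = ary[len(ary) - 1]
--   result = 1
--
--   while start <= end:
--     mid = (start + end) // 2
--     if check_installable(ary, deviceCnt, mid):
--       result = mid
--       start = mid + 1
--     else:
--       end = mid - 1
--
--   return result
-- ===== SOURCE B (Python) =====
-- def picked(ary, minInterval):
--   chosen = []
--   for p in ary:
--     if p == ary[0] or p - (chosen[-1] if chosen else 0) >= minInterval:
--       chosen.append(p)
--   return chosen
--
-- def bisect_best_installable_dist(ary, deviceCnt):
--   def last_feasible(lo, hi):
--     if lo > hi:
--       return None
--     mid = (lo + hi) // 2
--     if len(picked(ary, mid)) >= deviceCnt: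
--       r = last_feasible(mid + 1, hi)
--       return mid if r is None else r
--     return last_feasible(lo, mid - 1)
--   r = last_feasible(0, ary[-1])
--   return 1 if r is None else r
-- ===== Notes on version B (the rewrite author's own statement) =====
-- stated objective: alternative
-- what changed: The feasibility check now builds the list of picked house positions (reading chosen[-1] instead of carrying a prev/counter state) and tests its length, and the while-loop binary search with a result accumulator is replaced by an accumulator-free recursive search returning Optional[int] (the last feasible mid, combined by or-defaulting), with 1 substituted only at the top.
-- outside the precondition, e.g. on bisect_best_installable_dist([], 2): A raises IndexError, B raises IndexError
import Mathlib
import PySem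

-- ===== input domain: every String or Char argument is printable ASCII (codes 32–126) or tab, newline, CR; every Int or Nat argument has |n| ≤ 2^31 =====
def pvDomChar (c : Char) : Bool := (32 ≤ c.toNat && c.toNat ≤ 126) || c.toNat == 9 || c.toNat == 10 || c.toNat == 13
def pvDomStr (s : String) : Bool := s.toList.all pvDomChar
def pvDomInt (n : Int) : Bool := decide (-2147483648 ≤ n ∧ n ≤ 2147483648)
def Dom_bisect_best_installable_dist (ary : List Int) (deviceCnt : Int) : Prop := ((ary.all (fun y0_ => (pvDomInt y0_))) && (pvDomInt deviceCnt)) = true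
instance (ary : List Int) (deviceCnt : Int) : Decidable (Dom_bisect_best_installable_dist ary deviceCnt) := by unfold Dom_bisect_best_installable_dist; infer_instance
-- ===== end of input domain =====

-- B rebuilds the feasibility check as collecting the picked positions into a list (reading
-- chosen[-1], no prev/counter state) and replaces the while-loop binary search carrying a
-- result accumulator by an accumulator-free recursive search returning Option Int;
-- objective: alternative decomposition, same cost.
-- Both loop ports recurse on a fuel equal to the interval measure (e+1-start), a pure
-- totality guard: it strictly exceeds the iterations the Python loop performs.

-- ===== PORT A =====
-- check_installable: fold over houses carrying (deviceRemain, prevInstalledPose)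
def pvCheckA (ary : List Int) (deviceCnt minInterval : Int) : Bool :=
  let res := ary.foldl (fun (st : Int × Int) housePose =>
      if housePose == ary.headD 0 || housePose - st.2 ≥ minInterval then
        (st.1 - 1, housePose) else st) (deviceCnt, 0)
  if res.1 > 0 then false else true

-- the while-loop of A: while start <= end, carrying (start, end, result)
def pvLoopA (ary : List Int) (deviceCnt : Int) : Nat → Int → Int → Int → Int
  | 0, _, _, result => result
  | fuel + 1, start, e, result =>
    if start ≤ e then
      -- mid = (start + end) // 2, written inline
      if pvCheckA ary deviceCnt (PySem.Int.floordiv (start + e) 2) then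
        pvLoopA ary deviceCnt fuel (PySem.Int.floordiv (start + e) 2 + 1) e (PySem.Int.floordiv (start + e) 2)
      else pvLoopA ary deviceCnt fuel start (PySem.Int.floordiv (start + e) 2 - 1) result
    else result

def bisect_best_installable_dist (ary : List Int) (deviceCnt : Int) : Int :=
  match PySem.List.pyGet? ary ((ary.length : Int) - 1) with
  | none => 0          -- ary = []: Python raises IndexError; excluded by Pre_
  | some e => pvLoopA ary deviceCnt (e + 1).toNat 0 e 1

-- ===== PORT B =====
-- picked: the list of house positions the greedy installs at (chosen[-1] is the previous one)
def pvPicked (ary : List Int) (minInterval : Int) : List Int :=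
  ary.foldl (fun chosen p =>
      if p == ary.headD 0 || p - chosen.getLastD 0 ≥ minInterval then chosen ++ [p]
      else chosen) []

-- last_feasible(lo, hi): the last feasible mid the bisection visits, none if it visits none
def pvLastFeasible (ary : List Int) (deviceCnt : Int) : Nat → Int → Int → Option Int
  | 0, _, _ => none
  | fuel + 1, lo, hi =>
    if lo > hi then none
    else
      -- mid = (lo + hi) // 2, written inline
      if decide (((pvPicked ary (PySem.Int.floordiv (lo + hi) 2)).length : Int) ≥ deviceCnt) then
        -- 'mid if r is None else r', wrapped back into some
        some ((pvLastFeasible ary deviceCnt fuel (PySem.Int.floordiv (lo + hi) 2 + 1) hi).getD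
          (PySem.Int.floordiv (lo + hi) 2))
      else pvLastFeasible ary deviceCnt fuel lo (PySem.Int.floordiv (lo + hi) 2 - 1)

def bisect_best_installable_dist_alt (ary : List Int) (deviceCnt : Int) : Int :=
  match PySem.List.pyGet? ary (-1) with
  | none => 0          -- ary = []: Python raises IndexError; excluded by Pre_
  | some hi => (pvLastFeasible ary deviceCnt (hi + 1).toNat 0 hi).getD 1

-- ===== PRECONDITION & SPEC =====
-- Pre_ excludes only the empty list, on which A raises IndexError (ary[len(ary)-1]).
def Pre_bisect_best_installable_dist (ary : List Int) (deviceCnt : Int) : Prop := ary ≠ []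
instance (ary : List Int) (deviceCnt : Int) : Decidable (Pre_bisect_best_installable_dist ary deviceCnt) := by unfold Pre_bisect_best_installable_dist; infer_instance

def pvWitness_bisect_best_installable_dist : List Int × Int := ([1, 2, 8, 4, 9], 3)

def Spec_bisect_best_installable_dist (ary : List Int) (deviceCnt : Int) (out : Int) : Prop := out = bisect_best_installable_dist_alt ary deviceCnt
instance (ary : List Int) (deviceCnt : Int) (out : Int) : Decidable (Spec_bisect_best_installable_dist ary deviceCnt out) := by unfold Spec_bisect_best_installable_dist; infer_instance

-- ===== CLAIM =====
def Claim_equal_bisect_best_installable_dist : Prop := ∀ (ary : List Int) (deviceCnt : Int), Dom_bisect_best_installable_dist ary deviceCnt → Pre_bisect_best_installable_dist ary deviceCnt → Spec_bisect_best_installable_dist ary deviceCnt (bisect_best_installable_dist ary deviceCnt)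

-- ===== LEMMAS AND PROOFS =====

-- A's fold state mirrors B's picked list: counter = rA - (picks made), prev = last pick
theorem pvFold_inv (ary l : List Int) (mi rA : Int) (acc : List Int) :
    (l.foldl (fun (st : Int × Int) housePose =>
        if housePose == ary.headD 0 || housePose - st.2 ≥ mi then
          (st.1 - 1, housePose) else st) (rA, acc.getLastD 0)).1
      = rA - (((l.foldl (fun chosen p =>
          if p == ary.headD 0 || p - chosen.getLastD 0 ≥ mi then chosen ++ [p]
          else chosen) acc).length : Int) - (acc.length : Int))
    ∧ (l.foldl (fun (st : Int × Int) housePose =>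
        if housePose == ary.headD 0 || housePose - st.2 ≥ mi then
          (st.1 - 1, housePose) else st) (rA, acc.getLastD 0)).2
      = (l.foldl (fun chosen p =>
          if p == ary.headD 0 || p - chosen.getLastD 0 ≥ mi then chosen ++ [p]
          else chosen) acc).getLastD 0 := by
  induction l generalizing rA acc with
  | nil => simp
  | cons x xs ih =>
    simp only [List.foldl_cons]
    split_ifs with h1
    · have hlast : (acc ++ [x]).getLastD 0 = x := by simp
      obtain ⟨ha, hb⟩ := ih (rA - 1) (acc ++ [x])
      rw [hlast] at ha hb
      refine ⟨?_, hb⟩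
      rw [ha]; simp; omega
    · exact ih rA acc

theorem pvCheck_eq (ary : List Int) (deviceCnt mi : Int) :
    pvCheckA ary deviceCnt mi = decide (((pvPicked ary mi).length : Int) ≥ deviceCnt) := by
  unfold pvCheckA pvPicked
  obtain ⟨h1, _⟩ := pvFold_inv ary ary mi deviceCnt []
  simp only [List.getLastD_nil, List.length_nil, Nat.cast_zero, sub_zero] at h1
  by_cases hgt : (ary.foldl (fun (st : Int × Int) housePose =>
      if housePose == ary.headD 0 || housePose - st.2 ≥ mi then
        (st.1 - 1, housePose) else st) (deviceCnt, 0)).1 > 0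
  · simp only [hgt, if_true]
    symm; simp only [decide_eq_false_iff_not]; omega
  · simp only [hgt, if_false]
    symm; simp only [decide_eq_true_eq]; omega

theorem pvLoop_eq (ary : List Int) (deviceCnt : Int) (fuel : Nat) :
    ∀ (s e r : Int), pvLoopA ary deviceCnt fuel s e r
      = (pvLastFeasible ary deviceCnt fuel s e).getD r := by
  induction fuel with
  | zero => intro s e r; rfl
  | succ fuel ih =>
    intro s e r
    rw [pvLoopA, pvLastFeasible]
    by_cases hse : s ≤ e
    · rw [if_pos hse, if_neg (by omega : ¬ s > e)]
      rw [pvCheck_eq]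
      by_cases hc : decide (((pvPicked ary (PySem.Int.floordiv (s + e) 2)).length : Int) ≥ deviceCnt) = true
      · rw [if_pos hc, if_pos hc, Option.getD_some]
        exact ih _ _ _
      · rw [if_neg hc, if_neg hc]
        exact ih _ _ _
    · rw [if_neg hse, if_pos (by omega : s > e)]
      rfl

theorem pvGet_eq (ary : List Int) (h : ary ≠ []) :
    PySem.List.pyGet? ary ((ary.length : Int) - 1) = PySem.List.pyGet? ary (-1) := by
  rw [PySem.List.pyGet?_neg_one]
  have hl : 0 < ary.length := List.length_pos_of_ne_nil h
  have : ((ary.length : Int) - 1) = ((ary.length - 1 : Nat) : Int) := by omega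
  rw [this, PySem.List.pyGet?_natCast, List.getLast?_eq_getElem?]

-- ===== VERDICT =====
theorem bisect_best_installable_dist_spec : Claim_equal_bisect_best_installable_dist := by
  intro ary deviceCnt _ hpre
  unfold Spec_bisect_best_installable_dist
  unfold bisect_best_installable_dist bisect_best_installable_dist_alt
  rw [pvGet_eq ary hpre]
  cases PySem.List.pyGet? ary (-1) with
  | none => rfl
  | some e => exact pvLoop_eq ary deviceCnt (e + 1).toNat 0 e 1
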